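-- pv_equiv track=rewrite | github.com/n7tms/EverybodyCodes | 2025/q15b.py | build_wall_segments
-- ===== SOURCE A (Python) =====
-- def build_wall_segments(instr):
--     x, y, dx, dy = 0, 0, 0, 1
--     wall_segments = []
--     for direct, amount in instr:
--         dx, dy = (-dy, dx) if direct == "L" else (dy, -dx)
--         xn, yn = x + amount * dx, y + amount * dy
--         wall_segments.append((x, y, xn, yn))
--         x, y = xn, yn
--     return (0, 0), (x, y), wall_segments
-- ===== SOURCE B (Python) =====
-- from itertools import accumulate
--
-- def build_wall_segments(instr):
--     # pass 1: rotation scan -> displacement vectors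
--     dx, dy = 0, 1
--     disps = []
--     for direct, amount in instr:
--         dx, dy = (-dy, dx) if direct == "L" else (dy, -dx)
--         disps.append((amount * dx, amount * dy))
--     # pass 2: prefix-sum the displacements into vertices
--     verts = list(accumulate(disps, lambda p, d: (p[0] + d[0], p[1] + d[1]),
--                             initial=(0, 0)))
--     # pass 3: zip consecutive vertices into segments
--     segments = [(px, py, qx, qy) for (px, py), (qx, qy) in zip(verts, verts[1:])]
--     return (0, 0), verts[-1], segments
-- ===== Notes on version B (the rewrite author's own statement) =====
-- stated objective: alternative
-- what changed: Replaces the single stateful simulation loop by three separate passes: a rotation scan producing displacement vectors, a prefix-sum (itertools.accumulate) producing the vertex list, and a zip of consecutive vertices producing the segments.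
import Mathlib
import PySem

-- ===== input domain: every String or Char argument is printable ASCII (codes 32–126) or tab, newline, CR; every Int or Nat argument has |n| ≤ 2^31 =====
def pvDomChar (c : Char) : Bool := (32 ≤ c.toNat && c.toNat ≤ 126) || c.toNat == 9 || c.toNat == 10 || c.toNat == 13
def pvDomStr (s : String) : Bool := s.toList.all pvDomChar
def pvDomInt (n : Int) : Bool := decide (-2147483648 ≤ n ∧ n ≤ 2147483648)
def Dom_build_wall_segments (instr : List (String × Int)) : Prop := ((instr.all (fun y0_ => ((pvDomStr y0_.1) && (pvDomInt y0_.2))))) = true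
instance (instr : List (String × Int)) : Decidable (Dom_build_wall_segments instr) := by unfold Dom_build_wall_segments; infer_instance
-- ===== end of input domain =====

-- ===== PORT A =====
-- the for-loop of A, ported as tail recursion over the same (x, y, dx, dy, wall_segments) state
def awLoop : List (String × Int) → Int → Int → Int → Int → List (Int × Int × Int × Int) → (Int × Int) × List (Int × Int × Int × Int)
  | [], x, y, _, _, segs => ((x, y), segs)
  | (direct, amount) :: rest, x, y, dx, dy, segs =>
    let d := if direct == "L" then (-dy, dx) else (dy, -dx)
    let xn := x + amount * d.1
    let yn := y + amount * d.2
    awLoop rest xn yn d.1 d.2 (segs ++ [(x, y, xn, yn)])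

def build_wall_segments (instr : List (String × Int)) : (Int × Int) × (Int × Int) × (List (Int × Int × Int × Int)) :=
  let r := awLoop instr 0 0 0 1 []
  ((0, 0), r.1, r.2)

-- ===== PORT B =====
-- pass 1: rotation scan producing the displacement vectors
def pvDisps : List (String × Int) → Int → Int → List (Int × Int)
  | [], _, _ => []
  | (direct, amount) :: rest, dx, dy =>
    let d := if direct == "L" then (-dy, dx) else (dy, -dx)
    (amount * d.1, amount * d.2) :: pvDisps rest d.1 d.2

-- pass 2: prefix sums of the displacements after the initial vertex (itertools.accumulate)
def pvAccum : List (Int × Int) → Int × Int → List (Int × Int)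
  | [], _ => []
  | d :: rest, p =>
    let q := (p.1 + d.1, p.2 + d.2)
    q :: pvAccum rest q

def build_wall_segments_alt (instr : List (String × Int)) : (Int × Int) × (Int × Int) × (List (Int × Int × Int × Int)) :=
  let disps := pvDisps instr 0 1
  let verts := ((0 : Int), (0 : Int)) :: pvAccum disps (0, 0)
  let segments := (verts.zip verts.tail).map (fun pq => (pq.1.1, pq.1.2, pq.2.1, pq.2.2))
  ((0, 0), verts.getLast?.getD (0, 0), segments)

-- ===== PRECONDITION & SPEC =====
def Spec_build_wall_segments (instr : List (String × Int)) (out : (Int × Int) × (Int × Int) × (List (Int × Int × Int × Int))) : Prop := out = build_wall_segments_alt instr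
instance (instr : List (String × Int)) (out : (Int × Int) × (Int × Int) × (List (Int × Int × Int × Int))) : Decidable (Spec_build_wall_segments instr out) := by unfold Spec_build_wall_segments; infer_instance

-- ===== CLAIM (what is proved, stated in full; the proofs are below) =====
def Claim_equal_build_wall_segments : Prop := ∀ (instr : List (String × Int)), Dom_build_wall_segments instr → Spec_build_wall_segments instr (build_wall_segments instr)

-- ===== LEMMAS AND PROOFS =====

-- end point after applying the displacements from (x, y)
def pvEnd : List (Int × Int) → Int × Int → Int × Int
  | [], p => p
  | d :: rest, p => pvEnd rest (p.1 + d.1, p.2 + d.2)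

-- segments generated from (x, y) by the displacement list
def pvSegs : List (Int × Int) → Int × Int → List (Int × Int × Int × Int)
  | [], _ => []
  | d :: rest, p => (p.1, p.2, p.1 + d.1, p.2 + d.2) :: pvSegs rest (p.1 + d.1, p.2 + d.2)

theorem awLoop_eq (instr : List (String × Int)) :
    ∀ (x y dx dy : Int) (acc : List (Int × Int × Int × Int)),
    awLoop instr x y dx dy acc
      = (pvEnd (pvDisps instr dx dy) (x, y), acc ++ pvSegs (pvDisps instr dx dy) (x, y)) := by
  induction instr with
  | nil => intro x y dx dy acc; simp [awLoop, pvDisps, pvEnd, pvSegs]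
  | cons hd tl ih =>
    intro x y dx dy acc
    obtain ⟨direct, amount⟩ := hd
    by_cases h : direct == "L" <;>
      simp [awLoop, pvDisps, pvEnd, pvSegs, h, ih]

theorem accum_zip (ds : List (Int × Int)) :
    ∀ (p : Int × Int),
    ((p :: pvAccum ds p).zip (pvAccum ds p)).map (fun pq => (pq.1.1, pq.1.2, pq.2.1, pq.2.2))
      = pvSegs ds p := by
  induction ds with
  | nil => intro p; simp [pvAccum, pvSegs]
  | cons d rest ih =>
    intro p
    simp [pvAccum, pvSegs, ih]

theorem accum_last (ds : List (Int × Int)) :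
    ∀ (p : Int × Int), (p :: pvAccum ds p).getLast?.getD (0, 0) = pvEnd ds p := by
  induction ds with
  | nil => intro p; simp [pvAccum, pvEnd]
  | cons d rest ih =>
    intro p
    simp only [pvAccum, pvEnd, List.getLast?_cons_cons]
    exact ih _


-- ===== VERDICT (by name: the statement is the Claim_ definition above) =====
theorem build_wall_segments_spec : Claim_equal_build_wall_segments := by
  intro instr _
  unfold Spec_build_wall_segments build_wall_segments build_wall_segments_alt
  rw [awLoop_eq]
  simp only [List.tail_cons]
  rw [accum_zip, accum_last]
  simp
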